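-- pv_equiv track=rewrite | github.com/LHZ98/stage-aware-retinal-image-generation | main/mask_generation/plot_segment_visualization.py | _segment_colors
-- ===== SOURCE A (Python) =====
-- def _segment_colors(n: int):
--     base = [
--         "#1f77b4", "#ff7f0e", "#2ca02c", "#d62728", "#9467bd",
--         "#8c564b", "#e377c2", "#7f7f7f", "#bcbd22", "#17becf",
--         "#aec7e8", "#ffbb78", "#98df8a", "#ff9896", "#c5b0d5",
--         "#c49c94", "#f7b6d2", "#c7c7c7", "#dbdb8d", "#9edae5",
--     ]
--     out = []
--     for i in range(n):
--         out.append(base[i % len(base)])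
--     return out
-- ===== SOURCE B (Python) =====
-- def _segment_colors(n: int):
--     base = [
--         "#1f77b4", "#ff7f0e", "#2ca02c", "#d62728", "#9467bd",
--         "#8c564b", "#e377c2", "#7f7f7f", "#bcbd22", "#17becf",
--         "#aec7e8", "#ffbb78", "#98df8a", "#ff9896", "#c5b0d5",
--         "#c49c94", "#f7b6d2", "#c7c7c7", "#dbdb8d", "#9edae5",
--     ]
--     reps = n // len(base) + 1
--     return (base * reps)[:n]
-- ===== Notes on version B (the rewrite author's own statement) =====
-- stated objective: simpler
-- what changed: Replaces the per-index loop appending base[i % len(base)] with replicating the whole palette ceil-many times and slicing off the first n entries in one step.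
import Mathlib
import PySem

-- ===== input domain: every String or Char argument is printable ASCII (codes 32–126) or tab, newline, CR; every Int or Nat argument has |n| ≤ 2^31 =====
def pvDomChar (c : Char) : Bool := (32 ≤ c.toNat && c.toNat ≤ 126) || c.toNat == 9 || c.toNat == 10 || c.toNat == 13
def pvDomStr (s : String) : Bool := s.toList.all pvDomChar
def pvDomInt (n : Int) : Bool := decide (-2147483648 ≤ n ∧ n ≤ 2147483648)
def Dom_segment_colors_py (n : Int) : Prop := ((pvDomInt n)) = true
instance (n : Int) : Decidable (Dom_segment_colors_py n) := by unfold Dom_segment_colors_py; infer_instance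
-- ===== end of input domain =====

-- B replicates the palette n // 20 + 1 times and slices to n, instead of A's per-index modular loop (objective: simpler).

-- the shared 20-colour palette literal both Pythons carry verbatim
def pvPalette : List String := [
  "#1f77b4", "#ff7f0e", "#2ca02c", "#d62728", "#9467bd",
  "#8c564b", "#e377c2", "#7f7f7f", "#bcbd22", "#17becf",
  "#aec7e8", "#ffbb78", "#98df8a", "#ff9896", "#c5b0d5",
  "#c49c94", "#f7b6d2", "#c7c7c7", "#dbdb8d", "#9edae5"]

-- ===== PORT A =====
-- out = []; for i in range(n): out.append(base[i % len(base)]); return out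
-- base[i % 20] never raises (0 ≤ i % 20 < 20), so pyGetD with an unused default is exact here.
def segment_colors_py (n : Int) : List String :=
  (PySem.List.pyRange 0 n 1).foldl
    (fun out i => out ++ [PySem.List.pyGetD pvPalette (PySem.Int.mod i 20) ""]) []

-- ===== PORT B =====
-- reps = n // len(base) + 1; return (base * reps)[:n]
-- Python 'base * reps' is [] for reps ≤ 0, which '.toNat' reproduces exactly.
def segment_colors_py_alt (n : Int) : List String :=
  PySem.List.slice ((List.replicate (PySem.Int.floordiv n 20 + 1).toNat pvPalette).flatten)
    none (some n)

-- ===== PRECONDITION & SPEC =====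
def Spec_segment_colors_py (n : Int) (out : List String) : Prop := out = segment_colors_py_alt n
instance (n : Int) (out : List String) : Decidable (Spec_segment_colors_py n out) := by unfold Spec_segment_colors_py; infer_instance

-- ===== CLAIM (what is proved, stated in full; the proofs are below) =====
def Claim_equal_segment_colors_py : Prop := ∀ (n : Int), Dom_segment_colors_py n → Spec_segment_colors_py n (segment_colors_py n)

-- ===== LEMMAS AND PROOFS =====

-- the common normal form of both ports on n ≥ 0
def pvCycle (m : Nat) : List String := (List.range m).map (fun k => pvPalette.getD (k % 20) "")

theorem pvPort_a_eq_cycle (n : Int) (_hn : 0 ≤ n) : segment_colors_py n = pvCycle n.toNat := by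
  unfold segment_colors_py pvCycle
  rw [PySem.List.foldl_append_singleton_eq_map, PySem.List.pyRange_one]
  simp only [List.map_map, List.nil_append, sub_zero]
  refine List.map_congr_left (fun k hk => ?_)
  simp only [Function.comp, zero_add]
  rw [show PySem.Int.mod (k : Int) 20 = ((k % 20 : Nat) : Int) from by
    exact_mod_cast PySem.Int.mod_natCast k 20, PySem.List.pyGetD_natCast]

theorem pvReplicate_flatten_eq_cycle (r : Nat) :
    (List.replicate r pvPalette).flatten = pvCycle (r * 20) := by
  induction r with
  | zero => simp [pvCycle]
  | succ r ih =>
    rw [List.replicate_succ, List.flatten_cons, ih]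
    unfold pvCycle
    rw [Nat.succ_mul, Nat.add_comm, List.range_add, List.map_append, List.map_map]
    have h1 : (List.range 20).map (fun k => pvPalette.getD (k % 20) "") = pvPalette := by decide
    rw [h1]
    refine congrArg (pvPalette ++ ·) (List.map_congr_left (fun k hk => ?_))
    simp [Function.comp]

theorem pvPort_b_eq_cycle (n : Int) (hn : 0 ≤ n) : segment_colors_py_alt n = pvCycle n.toNat := by
  unfold segment_colors_py_alt
  rw [pvReplicate_flatten_eq_cycle, PySem.List.slice_to _ hn]
  unfold pvCycle
  rw [← List.map_take, List.take_range]
  congr 2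
  have h20 : PySem.Int.floordiv n 20 = (n.toNat / 20 : Nat) := by
    have := PySem.Int.floordiv_natCast n.toNat 20
    rw [Int.toNat_of_nonneg hn] at this
    exact this
  have : ((PySem.Int.floordiv n 20 + 1).toNat) = n.toNat / 20 + 1 := by
    rw [h20]; omega
  rw [this]
  omega

theorem pvBoth_nil (n : Int) (hn : n < 0) :
    segment_colors_py n = [] ∧ segment_colors_py_alt n = [] := by
  constructor
  · unfold segment_colors_py
    rw [PySem.List.pyRange_one_eq_nil (by omega)]
    rfl
  · unfold segment_colors_py_alt
    have hneg : PySem.Int.floordiv n 20 < 0 := by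
      rw [PySem.Int.floordiv_lt_iff_lt_mul (by omega)]
      omega
    have : (PySem.Int.floordiv n 20 + 1).toNat = 0 := by omega
    rw [this]
    simp [PySem.List.slice]

-- ===== VERDICT (by name: the statement is the Claim_ definition above) =====
theorem segment_colors_py_spec : Claim_equal_segment_colors_py := by
  intro n _
  unfold Spec_segment_colors_py
  rcases lt_or_ge n 0 with h | h
  · rw [(pvBoth_nil n h).1, (pvBoth_nil n h).2]
  · rw [pvPort_a_eq_cycle n h, pvPort_b_eq_cycle n h]
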